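-- pv_equiv track=rewrite | github.com/cgnetworking/ComplianceApp | portal_backend/env.py | _decode_env_value
-- ===== SOURCE A (Python) =====
-- def _decode_env_value(raw_value: str) -> str:
--     if len(raw_value) < 2:
--         return raw_value
--
--     quote = raw_value[0]
--     if quote not in {"'", '"'} or raw_value[-1] != quote:
--         return raw_value
--
--     inner = raw_value[1:-1]
--     if quote == "'":
--         return inner
--
--     decoded = []
--     idx = 0
--     while idx < len(inner):
--         char = inner[idx]
--         if char == "\\" and idx + 1 < len(inner):
--             escaped = inner[idx + 1]
--             if escaped in {'\\', '"', '$', '`'}: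
--                 decoded.append(escaped)
--                 idx += 2
--                 continue
--         decoded.append(char)
--         idx += 1
--     return "".join(decoded)
-- ===== SOURCE B (Python) =====
-- def _decode_env_value(raw_value: str) -> str:
--     if len(raw_value) < 2 or raw_value[0] not in "'\"" or raw_value[-1] != raw_value[0]:
--         return raw_value
--     inner = raw_value[1:-1]
--     if raw_value[0] == "'":
--         return inner
--     # Unescape \\ \" \$ \` via one C-level split on backslash plus a pass over the parts.
--     parts = inner.split('\\')
--     out = [parts[0]]
--     i = 1
--     n = len(parts)
--     while i < n:
--         p = parts[i]
--         if p:
--             if p[0] in '"$`':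
--                 out.append(p)
--             else:
--                 out.append('\\' + p)
--             i += 1
--         elif i + 1 < n:
--             out.append('\\' + parts[i + 1])
--             i += 2
--         else:
--             out.append('\\')
--             i += 1
--     return ''.join(out)
-- ===== Notes on version B (the rewrite author's own statement) =====
-- stated objective: alternative
-- what changed: The per-character index/while scan with idx+=1/idx+=2 stepping is replaced by one split of the inner string on backslash followed by a single pass over the resulting parts (each part is backslash-free), consuming one or two parts per step; the three guard clauses are merged into one.
import Mathlib
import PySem

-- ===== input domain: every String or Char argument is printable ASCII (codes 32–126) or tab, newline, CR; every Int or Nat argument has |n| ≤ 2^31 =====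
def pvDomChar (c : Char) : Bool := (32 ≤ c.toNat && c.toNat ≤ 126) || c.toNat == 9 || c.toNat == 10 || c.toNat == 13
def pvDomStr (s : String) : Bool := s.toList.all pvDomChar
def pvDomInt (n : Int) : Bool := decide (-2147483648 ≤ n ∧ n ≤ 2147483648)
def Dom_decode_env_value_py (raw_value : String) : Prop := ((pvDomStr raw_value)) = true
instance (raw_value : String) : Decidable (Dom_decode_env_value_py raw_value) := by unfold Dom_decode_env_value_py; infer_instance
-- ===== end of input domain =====

-- B replaces A's per-character index loop by one split on '\' plus a single pass over the parts (idiomatic; return value only).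

-- ===== PORT A =====
-- the while loop of A: char-by-char scan with an index and an accumulator
def pvALoop (inner : List Char) (idx : Nat) (decoded : List Char) : List Char :=
  if h : idx < inner.length then
    let char := inner[idx]
    if hc : char = '\\' ∧ idx + 1 < inner.length then
      let escaped := inner[idx + 1]'hc.2
      if escaped = '\\' ∨ escaped = '"' ∨ escaped = '$' ∨ escaped = '`' then
        pvALoop inner (idx + 2) (decoded ++ [escaped])
      else
        pvALoop inner (idx + 1) (decoded ++ [char])
    else
      pvALoop inner (idx + 1) (decoded ++ [char])
  else decoded
termination_by inner.length - idx

def decode_env_value_py (raw_value : String) : String :=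
  let s := raw_value.toList
  if s.length < 2 then raw_value
  else
    let quote := PySem.List.pyGetD s 0 ' '      -- raw_value[0], in range since len ≥ 2
    if ¬(quote = '\'' ∨ quote = '"') ∨ ¬(PySem.List.pyGetD s (-1) ' ' = quote) then raw_value
    else
      let inner := PySem.List.slice s (some 1) (some (-1))   -- raw_value[1:-1]
      if quote = '\'' then String.ofList inner
      else String.ofList (pvALoop inner 0 [])

-- ===== PORT B =====
-- B's while loop over parts = inner.split('\\'): consumes one or two parts per step
def pvBParts : List (List Char) → List Char
  | [] => []
  | [] :: rest =>
    match rest with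
    | q :: rest' => ('\\' :: q) ++ pvBParts rest'   -- '\' + parts[i+1], i += 2
    | [] => ['\\']                                   -- trailing lone backslash
  | (c :: p) :: rest =>
    (if c = '"' ∨ c = '$' ∨ c = '`' then c :: p else '\\' :: c :: p) ++ pvBParts rest

def decode_env_value_py_alt (raw_value : String) : String :=
  let s := raw_value.toList
  if s.length < 2 ∨ ¬(PySem.List.pyGetD s 0 ' ' = '\'' ∨ PySem.List.pyGetD s 0 ' ' = '"')
      ∨ ¬(PySem.List.pyGetD s (-1) ' ' = PySem.List.pyGetD s 0 ' ') then raw_value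
  else
    let inner := PySem.List.slice s (some 1) (some (-1))   -- raw_value[1:-1]
    if PySem.List.pyGetD s 0 ' ' = '\'' then String.ofList inner
    else
      match inner.splitOn '\\' with                        -- inner.split('\\'); never returns []
      | [] => String.ofList []
      | p0 :: tail => String.ofList (p0 ++ pvBParts tail)      -- ''.join(out)

-- ===== PRECONDITION & SPEC =====
def Spec_decode_env_value_py (raw_value : String) (out : String) : Prop := out = decode_env_value_py_alt raw_value
instance (raw_value : String) (out : String) : Decidable (Spec_decode_env_value_py raw_value out) := by unfold Spec_decode_env_value_py; infer_instance

-- ===== CLAIM (what is proved, stated in full; the proofs are below) =====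
def Claim_equal_decode_env_value_py : Prop := ∀ (raw_value : String), Dom_decode_env_value_py raw_value → Spec_decode_env_value_py raw_value (decode_env_value_py raw_value)

-- ===== LEMMAS AND PROOFS =====

-- reference unescape function: one left-to-right scan with a two-char window
def pvEsc : List Char → List Char
  | [] => []
  | c :: rest =>
    if c = '\\' then
      match rest with
      | [] => ['\\']
      | d :: rest' =>
        if d = '\\' ∨ d = '"' ∨ d = '$' ∨ d = '`' then d :: pvEsc rest'
        else '\\' :: pvEsc (d :: rest')
    else c :: pvEsc rest
termination_by l => l.length

theorem pvEsc_cons_not_bs (c : Char) (rest : List Char) (h : c ≠ '\\') :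
    pvEsc (c :: rest) = c :: pvEsc rest := by
  rw [pvEsc.eq_def]; simp [h]

theorem pvEsc_bs_nil : pvEsc ['\\'] = ['\\'] := by
  rw [pvEsc.eq_def]; simp

theorem pvEsc_bs_cons (d : Char) (rest : List Char) :
    pvEsc ('\\' :: d :: rest) =
      if d = '\\' ∨ d = '"' ∨ d = '$' ∨ d = '`' then d :: pvEsc rest
      else '\\' :: pvEsc (d :: rest) := by
  rw [pvEsc.eq_def]; simp

theorem pvEsc_append (p xs : List Char) (h : '\\' ∉ p) : pvEsc (p ++ xs) = p ++ pvEsc xs := by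
  induction p with
  | nil => simp
  | cons c p ih =>
    have hc : c ≠ '\\' := by intro hc; exact h (by simp [hc])
    have hp : '\\' ∉ p := fun hm => h (by simp [hm])
    rw [List.cons_append, pvEsc_cons_not_bs c _ hc, ih hp]; simp

theorem pvALoop_esc (inner : List Char) (idx : Nat) (decoded : List Char) :
    pvALoop inner idx decoded = decoded ++ pvEsc (inner.drop idx) := by
  fun_induction pvALoop inner idx decoded with
  | case1 idx decoded h char hc escaped hesc ih =>
    obtain ⟨hbs, hlt⟩ := hc
    rw [ih, List.drop_eq_getElem_cons h, List.drop_eq_getElem_cons hlt,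
      show inner[idx] = '\\' from hbs, pvEsc_bs_cons, if_pos hesc]
    simp
    rfl
  | case2 idx decoded h char hc escaped hesc ih =>
    obtain ⟨hbs, hlt⟩ := hc
    rw [ih, List.drop_eq_getElem_cons h, List.drop_eq_getElem_cons hlt,
      show inner[idx] = '\\' from hbs, pvEsc_bs_cons, if_neg hesc]
    simp [hbs]
  | case3 idx decoded h char hc ih =>
    rw [ih, List.drop_eq_getElem_cons h]
    by_cases hbs : inner[idx] = '\\'
    · have hlen : ¬ idx + 1 < inner.length := fun hl => hc ⟨hbs, hl⟩
      have hdrop : inner.drop (idx + 1) = [] := List.drop_eq_nil_of_le (by omega)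
      rw [hdrop, show inner[idx] = '\\' from hbs, pvEsc_bs_nil]
      simp
      exact ⟨hbs, by simp [pvEsc]⟩
    · rw [pvEsc_cons_not_bs _ _ hbs]
      simp
      rfl
  | case4 idx decoded h =>
    rw [List.drop_eq_nil_of_le (by omega)]
    simp [pvEsc]

theorem pvBParts_esc : ∀ tail : List (List Char), (∀ p ∈ tail, '\\' ∉ p) →
    pvBParts tail = pvEsc (tail.flatMap (fun q => '\\' :: q)) := by
  intro tail
  fun_induction pvBParts tail with
  | case1 => intro _; simp [pvEsc]
  | case2 q rest' ih =>
    intro h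
    have hq : '\\' ∉ q := h q (by simp)
    have hrest : ∀ p ∈ rest', '\\' ∉ p := fun p hp => h p (by simp [hp])
    simp only [List.flatMap_cons, List.nil_append, List.cons_append]
    rw [ih hrest, pvEsc_bs_cons, if_pos (Or.inl rfl), pvEsc_append q _ hq]
  | case3 => intro _; simp only [List.flatMap_cons, List.flatMap_nil, List.append_nil]; rw [pvEsc_bs_nil]
  | case4 c p rest ih =>
    intro h
    have hcp : '\\' ∉ (c :: p) := h (c :: p) (by simp)
    have hc : c ≠ '\\' := by intro hc; exact hcp (by simp [hc])
    have hp : '\\' ∉ p := fun hm => hcp (by simp [hm])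
    have hrest : ∀ q ∈ rest, '\\' ∉ q := fun q hq => h q (by simp [hq])
    rw [ih hrest]
    simp only [List.flatMap_cons, List.cons_append]
    rw [pvEsc_bs_cons]
    by_cases hset : c = '"' ∨ c = '$' ∨ c = '`'
    · rw [if_pos (Or.inr hset), if_pos hset, pvEsc_append p _ hp]
      simp
    · have hnot : ¬(c = '\\' ∨ c = '"' ∨ c = '$' ∨ c = '`') := by
        rintro (hx | hx) <;> [exact hc hx; exact hset hx]
      rw [if_neg hnot, if_neg hset,
        show (c :: (p ++ List.flatMap (fun q => '\\' :: q) rest)) =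
          ((c :: p) ++ List.flatMap (fun q => '\\' :: q) rest) from rfl,
        pvEsc_append _ _ hcp]
      simp

theorem splitOn_no_sep (x : Char) (xs : List Char) : ∀ p ∈ xs.splitOn x, x ∉ p := by
  unfold List.splitOn
  induction xs with
  | nil => simp [List.splitOnP_nil]
  | cons a xs ih =>
    rw [List.splitOnP_cons]
    by_cases ha : a = x
    · simp only [ha, beq_self_eq_true, if_pos]
      intro p hp
      rcases List.mem_cons.mp hp with hp | hp
      · simp [hp]
      · exact ih p hp
    · have hne : (a == x) = false := by simp [ha]
      simp only [hne, Bool.false_eq_true, if_false]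
      obtain ⟨p0, rest, hsplit⟩ : ∃ p0 rest, List.splitOnP (fun c => c == x) xs = p0 :: rest := by
        rcases hx : List.splitOnP (fun c => c == x) xs with _ | ⟨p0, rest⟩
        · exact absurd hx (List.splitOnP_ne_nil _ xs)
        · exact ⟨p0, rest, rfl⟩
      rw [hsplit, List.modifyHead_cons]
      intro p hp
      rcases List.mem_cons.mp hp with hp | hp
      · subst hp
        intro hm
        rcases List.mem_cons.mp hm with hm | hm
        · exact ha hm.symm
        · exact ih p0 (by rw [hsplit]; simp) hm
      · exact ih p (by rw [hsplit]; simp [hp])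

theorem inter_flat (x : Char) : ∀ (ps : List (List Char)) (p : List Char),
    [x].intercalate (p :: ps) = p ++ ps.flatMap (fun q => x :: q) := by
  intro ps
  induction ps with
  | nil => intro p; simp [List.intercalate]
  | cons q ps ih =>
    intro p
    simp only [List.intercalate] at *
    rw [List.intersperse_cons₂, List.flatten_cons, List.flatten_cons, List.flatMap_cons,
      ← List.append_assoc, ← List.append_assoc]
    have := ih q
    rw [this]
    simp

theorem esc_eq_bparts (inner : List Char) :
    pvEsc inner = (match inner.splitOn '\\' with
      | [] => []
      | p0 :: tail => p0 ++ pvBParts tail) := by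
  obtain ⟨p0, tail, hsplit⟩ : ∃ p0 tail, inner.splitOn '\\' = p0 :: tail := by
    rcases hx : inner.splitOn '\\' with _ | ⟨p0, tail⟩
    · exact absurd hx (List.splitOnP_ne_nil _ inner)
    · exact ⟨p0, tail, rfl⟩
  have hrecon : inner = p0 ++ tail.flatMap (fun q => '\\' :: q) := by
    have hI := List.intercalate_splitOn inner '\\'
    rw [hsplit, inter_flat] at hI
    exact hI.symm
  have hnos := splitOn_no_sep '\\' inner
  rw [hsplit] at hnos ⊢
  have hp0 : '\\' ∉ p0 := hnos p0 (by simp)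
  have htail : ∀ p ∈ tail, '\\' ∉ p := fun p hp => hnos p (by simp [hp])
  show pvEsc inner = p0 ++ pvBParts tail
  rw [hrecon, pvEsc_append _ _ hp0, pvBParts_esc tail htail]

-- ===== VERDICT (by name: the statement is the Claim_ definition above) =====
theorem decode_env_value_py_spec : Claim_equal_decode_env_value_py := by
  intro raw_value _
  unfold Spec_decode_env_value_py decode_env_value_py decode_env_value_py_alt
  set s := raw_value.toList with hs
  by_cases hl : s.length < 2
  · simp [hl]
  · by_cases hq : PySem.List.pyGetD s 0 ' ' = '\'' ∨ PySem.List.pyGetD s 0 ' ' = '"'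
    · by_cases hlast : PySem.List.pyGetD s (-1) ' ' = PySem.List.pyGetD s 0 ' '
      · by_cases hsq : PySem.List.pyGetD s 0 ' ' = '\''
        · simp [hl, hlast, hsq]
        · have halt := esc_eq_bparts (PySem.List.slice s (some 1) (some (-1)))
          have haloop := pvALoop_esc (PySem.List.slice s (some 1) (some (-1))) 0 []
          simp only [List.drop_zero, List.nil_append] at haloop
          simp only [hl, hlast, hsq, not_true, not_false_iff, or_false, false_or, if_neg]
          rw [haloop, halt]
          by_cases hdq : PySem.List.pyGetD s 0 ' ' = '"'
          · simp only [hdq]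
            rcases List.splitOn '\\' (PySem.List.slice s (some 1) (some (-1))) with _ | ⟨p0, tail⟩ <;> rfl
          · simp [hdq]
      · simp [hl, hq, hlast]
    · simp [hl, hq]
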